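-- pv_equiv track=rewrite | github.com/Romain-MIPI/projet_COMPLEX | code/methode.py | algo_couplage
-- ===== SOURCE A (Python) =====
-- def get_liste_aretes(G):
--     """
--     Retourne la liste des arêtes d'un graphe afin de faciliter l'implementation des algorithmes a la suite.
--
--     Parameters:
--     - G (tuple): Le graphe, représenté par un tuple (sommet, adjacences).
--
--     Returns:
--     - list[tuple]: Une liste des arêtes du graphe sous la forme de paires (u, v), où u et v sont des sommets.
--
--     Exemple:
--     >>> obtenir_liste_aretes(([0, 1, 2], [[1, 2], [0, 2], [0, 1]]))
--     [(0, 1), (0, 2), (1, 2)]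
--     """
--     aretes = []
--     sommets, adjacences = G
--     for u in sommets:
--         for v in adjacences[sommets.index(u)]:
--             if (u, v) not in aretes and (v, u) not in aretes:
--                 aretes.append((u, v))
--     return aretes
--
-- def algo_couplage(G):
--     """
--     Calcule une couverture a l'aide de l'algorithme de couplage.(exo: 3.2)
--
--     Parameters:
--     - G (tuple): Le graphe, représenté par un tuple (sommet, adjacences).
--
--     Returns:
--     - set[int]: Un ensemble de sommets qui forment la couverture.
--     """
--     C = set()
--     aretes = get_liste_aretes(G)
--     for u,v in aretes:
--         if u not in C and v not in C:
--             C.add(u)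
--             C.add(v)
--     return C
-- ===== SOURCE B (Python) =====
-- def algo_couplage(G):
--     # One pass over (index, vertex): skip repeated vertices (their row was
--     # already processed via the first occurrence) and run the greedy matching
--     # directly on edges as they are generated -- no edge list, no dedup scan.
--     sommets, adjacences = G
--     C = set()
--     visited = set()
--     for i, u in enumerate(sommets):
--         if u in visited:
--             continue
--         visited.add(u)
--         for v in adjacences[i]:
--             if u not in C and v not in C:
--                 C.add(u)
--                 C.add(v)
--     return C
-- ===== Notes on version B (the rewrite author's own statement) =====
-- stated objective: faster
-- what changed: B replaces A's two quadratic passes (edge-list construction with a linear dedup scan per edge and a per-vertex sommets.index call, then a second greedy pass) by a single fused pass over enumerate(sommets) with a visited set that skips repeated vertices, feeding generated edges straight into the greedy matching sets.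
import Mathlib
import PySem

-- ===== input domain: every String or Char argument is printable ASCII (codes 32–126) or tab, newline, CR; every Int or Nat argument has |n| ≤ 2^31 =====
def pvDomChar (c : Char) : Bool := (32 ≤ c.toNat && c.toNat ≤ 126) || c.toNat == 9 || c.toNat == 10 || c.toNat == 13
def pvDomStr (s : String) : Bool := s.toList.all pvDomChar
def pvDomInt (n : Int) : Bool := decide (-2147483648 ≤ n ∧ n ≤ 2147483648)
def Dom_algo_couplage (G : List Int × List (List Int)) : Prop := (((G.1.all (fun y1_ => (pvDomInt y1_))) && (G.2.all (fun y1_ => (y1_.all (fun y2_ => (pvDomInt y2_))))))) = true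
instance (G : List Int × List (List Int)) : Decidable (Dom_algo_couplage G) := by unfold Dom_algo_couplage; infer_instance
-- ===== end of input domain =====

-- B fuses edge generation, duplicate-row skipping (visited set) and the greedy
-- matching into one pass over enumerate(sommets); no quadratic edge-list dedup.
-- Return values proved equal; neither version mutates its argument.

-- ===== PORT A =====
-- helper of A: builds the edge list, deduplicating by scanning the list so far
def get_liste_aretes (G : List Int × List (List Int)) : List (Int × Int) :=
  G.1.foldl (fun aretes u =>
    (PySem.List.pyGetD G.2 (((PySem.List.index? G.1 u).getD 0 : Nat) : Int) []).foldl
      (fun ar v => if (u, v) ∉ ar ∧ (v, u) ∉ ar then ar ++ [(u, v)] else ar) aretes) []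

def algo_couplage (G : List Int × List (List Int)) : List Int :=
  (get_liste_aretes G).foldl
    (fun C p =>
      if ¬ PySem.Set.contains C p.1 ∧ ¬ PySem.Set.contains C p.2
      then PySem.Set.add (PySem.Set.add C p.1) p.2 else C)
    PySem.Set.empty

-- ===== PORT B =====
def algo_couplage_alt (G : List Int × List (List Int)) : List Int :=
  ((PySem.List.enumerate G.1 0).foldl
    (fun (s : PySem.Set Int × PySem.Set Int) iu =>
      if PySem.Set.contains s.2 iu.2 then s
      else
        ((PySem.List.pyGetD G.2 iu.1 []).foldl
           (fun C v =>
             if ¬ PySem.Set.contains C iu.2 ∧ ¬ PySem.Set.contains C v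
             then PySem.Set.add (PySem.Set.add C iu.2) v else C) s.1,
         PySem.Set.add s.2 iu.2))
    (PySem.Set.empty, PySem.Set.empty)).1

-- ===== PRECONDITION & SPEC =====
-- Pre_ excludes exactly the inputs where Python raises IndexError (both A and B do):
-- some vertex's first occurrence in sommets has no adjacency row, i.e. its first
-- index is ≥ len(adjacences).  'u ∈ take len(G.2) G.1' says u's first index < len(G.2).
def Pre_algo_couplage (G : List Int × List (List Int)) : Prop :=
  ∀ u ∈ G.1, u ∈ G.1.take G.2.length
instance (G : List Int × List (List Int)) : Decidable (Pre_algo_couplage G) := by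
  unfold Pre_algo_couplage; infer_instance

def pvWitness_algo_couplage : (List Int × List (List Int)) :=
  ([0, 1, 2], [[1, 2], [0, 2], [0, 1]])

def Spec_algo_couplage (G : List Int × List (List Int)) (out : List Int) : Prop := out = algo_couplage_alt G
instance (G : List Int × List (List Int)) (out : List Int) : Decidable (Spec_algo_couplage G out) := by unfold Spec_algo_couplage; infer_instance

-- ===== CLAIM (what is proved, stated in full; the proofs are below) =====
def Claim_equal_algo_couplage : Prop := ∀ (G : List Int × List (List Int)), Dom_algo_couplage G → Pre_algo_couplage G → Spec_algo_couplage G (algo_couplage G)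

-- ===== LEMMAS AND PROOFS =====

-- the greedy matching step shared by both programs
def pvStep (C : PySem.Set Int) (p : Int × Int) : PySem.Set Int :=
  if ¬ PySem.Set.contains C p.1 ∧ ¬ PySem.Set.contains C p.2
  then PySem.Set.add (PySem.Set.add C p.1) p.2 else C

def pvGreedy (C : PySem.Set Int) (l : List (Int × Int)) : PySem.Set Int :=
  l.foldl pvStep C

-- adjacency row A reads for vertex u (row of u's FIRST occurrence in full)
def pvRowF (full : List Int) (G2 : List (List Int)) (u : Int) : List Int :=
  PySem.List.pyGetD G2 (((PySem.List.index? full u).getD 0 : Nat) : Int) []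

-- the raw (undeduplicated) directed edge stream generated from the vertices of l
def pvRawF (full : List Int) (G2 : List (List Int)) (l : List Int) : List (Int × Int) :=
  l.flatMap (fun u => (pvRowF full G2 u).map (fun v => (u, v)))

-- A's dedup loop, as a function of the accumulator
def pvDedup (ar : List (Int × Int)) (l : List (Int × Int)) : List (Int × Int) :=
  l.foldl (fun ar p => if (p.1, p.2) ∉ ar ∧ (p.2, p.1) ∉ ar then ar ++ [(p.1, p.2)] else ar) ar

-- B's loop body
def pvBodyB (G2 : List (List Int)) (s : PySem.Set Int × PySem.Set Int) (iu : Int × Int) :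
    PySem.Set Int × PySem.Set Int :=
  if PySem.Set.contains s.2 iu.2 then s
  else
    ((PySem.List.pyGetD G2 iu.1 []).foldl
       (fun C v =>
         if ¬ PySem.Set.contains C iu.2 ∧ ¬ PySem.Set.contains C v
         then PySem.Set.add (PySem.Set.add C iu.2) v else C) s.1,
     PySem.Set.add s.2 iu.2)

theorem pvContains_iff (C : PySem.Set Int) (x : Int) :
    PySem.Set.contains C x = true ↔ x ∈ C := by
  simp [PySem.Set.contains]

theorem mem_pvStep_of_mem {C : PySem.Set Int} {p : Int × Int} {x : Int}
    (h : x ∈ C) : x ∈ pvStep C p := by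
  unfold pvStep
  split_ifs
  · simp [PySem.Set.mem_add]; tauto
  · exact h

theorem mem_pvGreedy_of_mem {C : PySem.Set Int} {x : Int}
    (l : List (Int × Int)) (h : x ∈ C) : x ∈ pvGreedy C l := by
  induction l generalizing C with
  | nil => exact h
  | cons p t ih => exact ih (mem_pvStep_of_mem h)

theorem pvStep_hit (C : PySem.Set Int) (p : Int × Int) :
    p.1 ∈ pvStep C p ∨ p.2 ∈ pvStep C p := by
  unfold pvStep
  split_ifs with h
  · left; simp [PySem.Set.mem_add]
  · rcases not_and_or.mp h with h1 | h1 <;>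
      [left; right] <;> exact (pvContains_iff _ _).mp (by simpa using h1)

theorem pvStep_noop {C : PySem.Set Int} {p : Int × Int}
    (h : p.1 ∈ C ∨ p.2 ∈ C) : pvStep C p = C := by
  unfold pvStep
  rw [if_neg]
  rcases h with h | h <;> simp [h]

theorem pvGreedy_hit {C : PySem.Set Int} {l : List (Int × Int)} :
    ∀ p ∈ l, p.1 ∈ pvGreedy C l ∨ p.2 ∈ pvGreedy C l := by
  induction l generalizing C with
  | nil => intro p hp; cases hp
  | cons q t ih =>
    intro p hp
    rcases List.mem_cons.mp hp with rfl | hp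
    · rcases pvStep_hit C p with h | h
      · left; exact mem_pvGreedy_of_mem t h
      · right; exact mem_pvGreedy_of_mem t h
    · exact ih p hp

theorem pvGreedy_noop {C : PySem.Set Int} {l : List (Int × Int)}
    (h : ∀ p ∈ l, p.1 ∈ C ∨ p.2 ∈ C) : pvGreedy C l = C := by
  induction l with
  | nil => rfl
  | cons q t ih =>
    have hq := pvStep_noop (h q (List.mem_cons_self))
    show pvGreedy (pvStep C q) t = C
    rw [hq]; exact ih (fun p hp => h p (List.mem_cons_of_mem _ hp))

theorem pvGreedy_append (C : PySem.Set Int) (l₁ l₂ : List (Int × Int)) :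
    pvGreedy C (l₁ ++ l₂) = pvGreedy (pvGreedy C l₁) l₂ :=
  List.foldl_append

-- deduplication does not change the greedy result
theorem pvDedup_append_new (l : List (Int × Int)) :
    ∀ ar : List (Int × Int), ∃ new, pvDedup ar l = ar ++ new := by
  induction l with
  | nil => intro ar; exact ⟨[], by simp [pvDedup]⟩
  | cons p t ih =>
    intro ar
    have hstep : pvDedup ar (p :: t) =
        if (p.1, p.2) ∉ ar ∧ (p.2, p.1) ∉ ar
        then pvDedup (ar ++ [(p.1, p.2)]) t else pvDedup ar t := by
      unfold pvDedup
      by_cases hc : (p.1, p.2) ∉ ar ∧ (p.2, p.1) ∉ ar <;> simp [hc]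
    rw [hstep]
    split_ifs
    · obtain ⟨new, hnew⟩ := ih (ar ++ [(p.1, p.2)])
      exact ⟨(p.1, p.2) :: new, by simp [hnew]⟩
    · exact ih ar

theorem pvGreedy_dedup (l : List (Int × Int)) :
    ∀ (ar : List (Int × Int)) (C : PySem.Set Int),
      (∀ p ∈ ar, p.1 ∈ C ∨ p.2 ∈ C) →
      pvGreedy C (pvDedup ar l) = pvGreedy C l := by
  induction l with
  | nil =>
    intro ar C h
    show pvGreedy C ar = pvGreedy C []
    rw [pvGreedy_noop h]; rfl
  | cons p t ih =>
    intro ar C h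
    show pvGreedy C (pvDedup ar (p :: t)) = pvGreedy (pvStep C p) t
    have hstep : pvDedup ar (p :: t) =
        if (p.1, p.2) ∉ ar ∧ (p.2, p.1) ∉ ar
        then pvDedup (ar ++ [(p.1, p.2)]) t else pvDedup ar t := by
      unfold pvDedup
      by_cases hc : (p.1, p.2) ∉ ar ∧ (p.2, p.1) ∉ ar <;> simp [hc]
    rw [hstep]
    split_ifs with hc
    · -- p is new: greedily process it, extend ar
      have h' : ∀ q ∈ ar ++ [(p.1, p.2)], q.1 ∈ pvStep C p ∨ q.2 ∈ pvStep C p := by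
        intro q hq
        rcases List.mem_append.mp hq with hq | hq
        · rcases h q hq with h1 | h1
          · left; exact mem_pvStep_of_mem h1
          · right; exact mem_pvStep_of_mem h1
        · have : q = (p.1, p.2) := by simpa using hq
          subst this
          simpa using pvStep_hit C p
      obtain ⟨new, hnew⟩ := pvDedup_append_new t (ar ++ [(p.1, p.2)])
      have h1 : pvGreedy C (pvDedup (ar ++ [(p.1, p.2)]) t) = pvGreedy (pvStep C p) new := by
        rw [hnew, pvGreedy_append, pvGreedy_append, pvGreedy_noop h]
        rfl
      have h2 : pvGreedy (pvStep C p) t = pvGreedy (pvStep C p) new := by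
        rw [← ih (ar ++ [(p.1, p.2)]) (pvStep C p) h', hnew, pvGreedy_append,
          pvGreedy_noop h']
      rw [h1, h2]
    · -- p (in some orientation) already in ar: the greedy step is a no-op
      have hp : p.1 ∈ C ∨ p.2 ∈ C := by
        rcases not_and_or.mp hc with h1 | h1
        · have := h (p.1, p.2) (not_not.mp h1); simpa using this
        · have := h (p.2, p.1) (not_not.mp h1); tauto
      rw [pvStep_noop hp]
      exact ih ar C h

-- A's edge list is the dedup of the raw edge stream
theorem get_liste_aretes_eq (G : List Int × List (List Int)) :
    get_liste_aretes G = pvDedup [] (pvRawF G.1 G.2 G.1) := by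
  unfold get_liste_aretes pvDedup pvRawF pvRowF
  rw [List.foldl_flatMap]
  simp [List.foldl_map]

theorem algo_couplage_eq_greedy (G : List Int × List (List Int)) :
    algo_couplage G = pvGreedy PySem.Set.empty (pvRawF G.1 G.2 G.1) := by
  show pvGreedy PySem.Set.empty (get_liste_aretes G)
      = pvGreedy PySem.Set.empty (pvRawF G.1 G.2 G.1)
  rw [get_liste_aretes_eq]
  exact pvGreedy_dedup _ [] _ (by simp)

-- B's main loop invariant
theorem pvBodyB_loop (G2 : List (List Int)) (t : List Int) :
    ∀ (pre : List Int) (C visited : PySem.Set Int),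
      (∀ x, x ∈ visited ↔ x ∈ pre) →
      (∀ u v, u ∈ visited → v ∈ pvRowF (pre ++ t) G2 u → u ∈ C ∨ v ∈ C) →
      ((PySem.List.enumerate t (pre.length : Int)).foldl (pvBodyB G2) (C, visited)).1
        = pvGreedy C (pvRawF (pre ++ t) G2 t) := by
  induction t with
  | nil => intro pre C visited _ _; rfl
  | cons u t ih =>
    intro pre C visited hvis hinv
    rw [PySem.List.enumerate_cons]
    have hfull : (pre ++ [u]) ++ t = pre ++ u :: t := by simp
    have hlen : ((pre.length : Int) + 1) = (((pre ++ [u]).length : Int)) := by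
      simp
    show ((PySem.List.enumerate t _).foldl (pvBodyB G2) (pvBodyB G2 (C, visited) ((pre.length : Int), u))).1
        = pvGreedy C (pvRawF (pre ++ u :: t) G2 (u :: t))
    have hraw : pvRawF (pre ++ u :: t) G2 (u :: t)
        = (pvRowF (pre ++ u :: t) G2 u).map (fun v => (u, v)) ++ pvRawF (pre ++ u :: t) G2 t := by
      unfold pvRawF; simp
    by_cases hu : u ∈ visited
    · -- duplicate vertex: B skips it, A's raw stream adds only no-op edges
      have hskip : pvBodyB G2 (C, visited) ((pre.length : Int), u) = (C, visited) := by
        unfold pvBodyB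
        rw [if_pos ((pvContains_iff _ _).mpr hu)]
      rw [hskip, hraw, pvGreedy_append]
      have hnoop : pvGreedy C ((pvRowF (pre ++ u :: t) G2 u).map (fun v => (u, v))) = C := by
        apply pvGreedy_noop
        intro p hp
        rcases List.mem_map.mp hp with ⟨v, hv, rfl⟩
        exact hinv u v hu hv
      rw [hnoop, hlen]
      rw [ih (pre ++ [u]) C visited ?_ ?_]
      · rw [hfull]
      · intro x
        rw [hvis x]
        simp only [List.mem_append, List.mem_singleton]
        constructor
        · exact Or.inl
        · intro hx
          rcases hx with hx | hx
          · exact hx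
          · rw [hx]
            exact (hvis u).mp hu
      · intro u' v hu' hv
        rw [hfull] at hv
        exact hinv u' v hu' hv
    · -- fresh vertex: its enumerate index IS its first index in the full list
      have hidx : PySem.List.index? (pre ++ u :: t) u = some pre.length := by
        rw [PySem.List.index?_eq_some_iff]
        exact ⟨pre, t, rfl, rfl, fun h => hu ((hvis u).mpr h)⟩
      have hrow : pvRowF (pre ++ u :: t) G2 u = PySem.List.pyGetD G2 ((pre.length : Nat) : Int) [] := by
        have hg : ((PySem.List.index? (pre ++ u :: t) u).getD 0 : Nat) = pre.length := by
          rw [hidx]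
          rfl
        unfold pvRowF
        rw [hg]
      have hbody : pvBodyB G2 (C, visited) ((pre.length : Int), u)
          = (pvGreedy C ((pvRowF (pre ++ u :: t) G2 u).map (fun v => (u, v))), PySem.Set.add visited u) := by
        unfold pvBodyB
        rw [if_neg (by simp [hu])]
        simp only [hrow]
        unfold pvGreedy pvStep
        rw [List.foldl_map]
      rw [hbody, hlen]
      rw [ih (pre ++ [u]) _ _ ?_ ?_]
      · rw [hfull, hraw, pvGreedy_append]
      · intro x
        rw [PySem.Set.mem_add]
        simp [hvis x]
      · intro u' v hu' hv
        rw [hfull] at hv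
        rcases (PySem.Set.mem_add visited u u').mp hu' with h' | rfl
        · rcases hinv u' v h' hv with h1 | h1
          · exact Or.inl (mem_pvGreedy_of_mem _ h1)
          · exact Or.inr (mem_pvGreedy_of_mem _ h1)
        · have : (u', v) ∈ (pvRowF (pre ++ u' :: t) G2 u').map (fun v => (u', v)) :=
            List.mem_map.mpr ⟨v, hv, rfl⟩
          exact pvGreedy_hit _ this

theorem algo_couplage_alt_eq_greedy (G : List Int × List (List Int)) :
    algo_couplage_alt G = pvGreedy PySem.Set.empty (pvRawF G.1 G.2 G.1) := by
  show ((PySem.List.enumerate G.1 ((([] : List Int).length : Nat) : Int)).foldl (pvBodyB G.2)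
        (PySem.Set.empty, PySem.Set.empty)).1
      = pvGreedy PySem.Set.empty (pvRawF G.1 G.2 G.1)
  rw [pvBodyB_loop G.2 G.1 [] PySem.Set.empty PySem.Set.empty (by simp [PySem.Set.empty]) (by simp [PySem.Set.empty])]
  rfl

-- ===== VERDICT (by name: the statement is the Claim_ definition above) =====
theorem algo_couplage_spec : Claim_equal_algo_couplage := by
  intro G _ _
  show algo_couplage G = algo_couplage_alt G
  rw [algo_couplage_eq_greedy, algo_couplage_alt_eq_greedy]
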